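-- pv_equiv track=rewrite | github.com/Sarah5567/leetcode-solutions | 0301-remove-invalid-parentheses/0301-remove-invalid-parentheses.py | get_invalid_open_positions
-- ===== SOURCE A (Python) =====
-- from typing import List
--
-- def get_invalid_open_positions(s: str) -> List[int]:
--     invalid_open = []
--     balance = 0
--     n = len(s)
--
--     for i, ch in enumerate(reversed(s)):
--         if ch == ')':
--             balance += 1
--         elif ch == '(':
--             if balance == 0:
--                 invalid_open.append(n - i - 1)
--             else:
--                 balance -= 1
--
--     return invalid_open
-- ===== SOURCE B (Python) =====
-- def get_invalid_open_positions(s):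
--     stack = []
--     for i, ch in enumerate(s):
--         if ch == '(':
--             stack.append(i)
--         elif ch == ')':
--             if stack:
--                 stack.pop()
--     return stack[::-1]
-- ===== Notes on version B (the rewrite author's own statement) =====
-- stated objective: idiomatic
-- what changed: Replaces A's reversed-order scan with a balance counter by a single forward pass that maintains an explicit stack of open-parenthesis indices, popping on each close, and returns the leftover stack reversed.
import Mathlib
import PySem

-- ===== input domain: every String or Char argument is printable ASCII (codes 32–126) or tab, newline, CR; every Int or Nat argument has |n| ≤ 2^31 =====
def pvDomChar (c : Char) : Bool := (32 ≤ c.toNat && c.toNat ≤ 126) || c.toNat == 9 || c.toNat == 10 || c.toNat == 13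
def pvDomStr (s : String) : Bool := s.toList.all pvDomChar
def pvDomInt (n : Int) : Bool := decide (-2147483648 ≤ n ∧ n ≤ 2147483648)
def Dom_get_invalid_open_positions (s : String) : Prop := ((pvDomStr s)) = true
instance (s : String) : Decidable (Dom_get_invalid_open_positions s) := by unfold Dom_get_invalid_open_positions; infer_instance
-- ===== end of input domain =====

-- B replaces A's reversed scan + balance counter with a forward pass keeping a stack of '(' indices (idiomatic; same O(n) cost).

-- ===== PORT A =====
def get_invalid_open_positions (s : String) : List Int :=
  let n : Int := PySem.Str.len s
  (List.foldl
    (fun (st : List Int × Int) (p : Int × Char) =>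
      if p.2 = ')' then (st.1, st.2 + 1)
      else if p.2 = '(' then
        (if st.2 = 0 then (st.1 ++ [n - p.1 - 1], st.2) else (st.1, st.2 - 1))
      else st)
    ([], 0) (PySem.List.enumerate s.toList.reverse)).1

-- ===== PORT B =====
def get_invalid_open_positions_alt (s : String) : List Int :=
  (List.foldl
    (fun (stack : List Int) (p : Int × Char) =>
      if p.2 = '(' then stack ++ [p.1]
      else if p.2 = ')' then (if stack ≠ [] then stack.dropLast else stack)
      else stack)
    [] (PySem.List.enumerate s.toList)).reverse

-- ===== PRECONDITION & SPEC =====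
def Spec_get_invalid_open_positions (s : String) (out : List Int) : Prop := out = get_invalid_open_positions_alt s
instance (s : String) (out : List Int) : Decidable (Spec_get_invalid_open_positions s out) := by unfold Spec_get_invalid_open_positions; infer_instance

-- ===== CLAIM (what is proved, stated in full; the proofs are below) =====
def Claim_equal_get_invalid_open_positions : Prop := ∀ (s : String), Dom_get_invalid_open_positions s → Spec_get_invalid_open_positions s (get_invalid_open_positions s)

-- ===== LEMMAS AND PROOFS =====

-- (u, stk): u = number of ')' in cs unmatched by a '(' to their right; stk = the ascending
-- stack of positions (offset by `off`) of '(' unmatched by a ')' in cs.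
def pvSU (off : Int) : List Char → Nat × List Int
  | [] => (0, [])
  | c :: cs =>
    let r := pvSU (off + 1) cs
    if c = ')' then (r.1 + 1, r.2)
    else if c = '(' then (if r.1 = 0 then (0, off :: r.2) else (r.1 - 1, r.2))
    else r

lemma pvA_char : ∀ (cs : List Char) (off m : Int), m = off + cs.length →
    List.foldl
      (fun (st : List Int × Int) (p : Int × Char) =>
        if p.2 = ')' then (st.1, st.2 + 1)
        else if p.2 = '(' then
          (if st.2 = 0 then (st.1 ++ [m - p.1 - 1], st.2) else (st.1, st.2 - 1))
        else st)
      ([], 0) (PySem.List.enumerate cs.reverse)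
    = ((pvSU off cs).2.reverse, ((pvSU off cs).1 : Int)) := by
  intro cs
  induction cs with
  | nil => intro off m h; simp [PySem.List.enumerate_nil, pvSU]
  | cons c cs ih =>
    intro off m h
    rw [List.reverse_cons, PySem.List.enumerate_append, List.foldl_append]
    rw [ih (off + 1) m (by simp at h ⊢; push_cast; omega)]
    simp only [PySem.List.enumerate_cons, PySem.List.enumerate_nil, List.length_reverse,
      List.foldl_cons, List.foldl_nil, pvSU]
    have hpos : m - (cs.length : Int) - 1 = off := by simp at h; omega
    by_cases h1 : c = ')'
    · simp [h1]
    · by_cases h2 : c = '('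
      · by_cases h3 : (pvSU (off + 1) cs).1 = 0
        · simp [h1, h2, h3, hpos]
        · have h5 : ((pvSU (off + 1) cs).1 : Int) ≠ 0 := by exact_mod_cast h3
          have h6 : (((pvSU (off + 1) cs).1 - 1 : Nat) : Int) = ((pvSU (off + 1) cs).1 : Int) - 1 := by
            omega
          simp [h2, h3, h5, h6]
      · simp [h1, h2]

lemma pvB_char : ∀ (cs : List Char) (off : Int) (st : List Int),
    List.foldl
      (fun (stack : List Int) (p : Int × Char) =>
        if p.2 = '(' then stack ++ [p.1]
        else if p.2 = ')' then (if stack ≠ [] then stack.dropLast else stack)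
        else stack)
      st (PySem.List.enumerate cs off)
    = st.take (st.length - (pvSU off cs).1) ++ (pvSU off cs).2 := by
  intro cs
  induction cs with
  | nil => intro off st; simp [PySem.List.enumerate_nil, pvSU]
  | cons c cs ih =>
    intro off st
    rw [PySem.List.enumerate_cons, List.foldl_cons]
    by_cases h2 : c = '('
    · simp only [h2, if_true, reduceIte]
      rw [ih (off + 1) (st ++ [off])]
      simp only [pvSU, h2, (by decide : ¬('(' = ')')), if_false, if_true, reduceIte]
      by_cases h3 : (pvSU (off + 1) cs).1 = 0
      · simp [h3, List.take_of_length_le]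
      · have h4 : 1 ≤ (pvSU (off + 1) cs).1 := Nat.one_le_iff_ne_zero.mpr h3
        simp only [h3, if_false, reduceIte]
        rw [List.length_append, List.length_singleton]
        have hlen : st.length + 1 - (pvSU (off + 1) cs).1 ≤ st.length := by omega
        rw [List.take_append_of_le_length hlen]
        congr 2
        omega
    · by_cases h1 : c = ')'
      · simp only [h1, (by decide : ¬(')' = '(')), if_false, if_true, reduceIte]
        rcases eq_or_ne st [] with hst | hst
        · subst hst
          simp only [ne_eq, not_true_eq_false, if_false, reduceIte]
          rw [ih (off + 1) []]
          simp [pvSU, h1]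
        · simp only [ne_eq, hst, not_false_eq_true, if_true, reduceIte]
          rw [ih (off + 1) st.dropLast]
          simp only [pvSU, h1, if_true, reduceIte]
          rw [List.length_dropLast, List.dropLast_eq_take, List.take_take]
          congr 2
          have : st.length ≠ 0 := fun h => hst (List.length_eq_zero_iff.mp h)
          omega
      · simp only [h1, h2, if_false, reduceIte]
        rw [ih (off + 1) st]
        simp [pvSU, h1, h2]

-- ===== VERDICT (by name: the statement is the Claim_ definition above) =====
theorem get_invalid_open_positions_spec : Claim_equal_get_invalid_open_positions := by
  intro s _
  unfold Spec_get_invalid_open_positions get_invalid_open_positions get_invalid_open_positions_alt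
  simp only [PySem.Str.len_eq]
  rw [pvB_char s.toList 0 []]
  rw [pvA_char s.toList 0 (s.toList.length) (by simp)]
  simp
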